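-- pv_equiv track=rewrite | github.com/jurek-muszynski/pipr-all | lab5-zadania/solutions_1.py | parking_monitor
-- ===== SOURCE A (Python) =====
-- def parking_monitor(entries):
--     taken_spots = {}
--     max_scooters = 0
--     for action, number in entries:
--         if action == "enter":
--             currently = taken_spots.get(number, 0) + 1
--             taken_spots[number] = currently
--         else:
--             currently = taken_spots.get(number, 0) - 1
--             taken_spots[number] = currently
--         if (currently > max_scooters):
--             max_scooters = taken_spots[number]
--     return max_scooters
-- ===== SOURCE B (Python) =====
-- def parking_monitor(entries):
--     # Partition by spot first: one (spot, delta) pair per entry, grouped per spot.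
--     pairs = [(number, 1 if action == "enter" else -1) for action, number in entries]
--     groups = {}
--     for number, delta in pairs:
--         groups[number] = groups.get(number, []) + [delta]
--     best = 0
--     for deltas in groups.values():
--         running = 0
--         peak = 0
--         for d in deltas:
--             running += d
--             if running > peak:
--                 peak = running
--         if peak > best:
--             best = peak
--     return best
-- ===== Notes on version B (the rewrite author's own statement) =====
-- stated objective: alternative
-- what changed: B partitions the entries by spot into per-spot delta timelines first, then computes each spot's running-sum peak independently and takes the maximum peak (floored at 0), instead of A's single interleaved pass maintaining live counts and a global max.
import Mathlib
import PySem

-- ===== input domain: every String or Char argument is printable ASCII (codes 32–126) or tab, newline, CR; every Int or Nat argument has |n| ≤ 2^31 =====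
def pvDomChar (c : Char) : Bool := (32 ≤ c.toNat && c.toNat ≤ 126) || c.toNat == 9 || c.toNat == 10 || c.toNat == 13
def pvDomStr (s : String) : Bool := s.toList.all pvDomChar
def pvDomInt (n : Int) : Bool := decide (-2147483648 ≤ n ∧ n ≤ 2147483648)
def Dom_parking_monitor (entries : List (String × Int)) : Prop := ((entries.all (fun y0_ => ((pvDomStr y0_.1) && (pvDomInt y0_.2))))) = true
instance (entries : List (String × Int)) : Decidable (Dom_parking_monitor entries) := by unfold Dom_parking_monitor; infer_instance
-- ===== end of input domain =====

-- B partitions the entries by spot into per-spot delta timelines first, then takes the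
-- maximum per-spot running-sum peak (floored at 0), instead of A's single interleaved
-- pass with live counts and a global max. Objective: alternative decomposition.

-- ===== PORT A =====
-- one interleaved pass: dict of live counts + running maximum
def parking_monitor (entries : List (String × Int)) : Int :=
  (entries.foldl
    (fun (st : PySem.Dict Int Int × Int) e =>
      let taken := st.1
      let mx := st.2
      let currently :=
        if e.1 == "enter" then taken.getD e.2 0 + 1 else taken.getD e.2 0 - 1
      let taken' := taken.insert e.2 currently
      -- `taken_spots[number]` after the assignment: key present, so getD is exact
      (taken', if currently > mx then taken'.getD e.2 0 else mx))
    (PySem.Dict.empty, 0)).2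

-- ===== PORT B =====
-- group (spot, delta) pairs per spot, then per-spot peak of running sums
def parking_monitor_alt (entries : List (String × Int)) : Int :=
  let pairs := entries.map (fun e => (e.2, if e.1 == "enter" then (1 : Int) else -1))
  let groups := pairs.foldl (fun d p => d.modify p.1 [] (· ++ [p.2])) PySem.Dict.empty
  groups.values.foldl
    (fun best deltas =>
      let peak :=
        (deltas.foldl
          (fun (s : Int × Int) d =>
            let running := s.1 + d
            (running, if running > s.2 then running else s.2))
          (0, 0)).2
      if peak > best then peak else best)
    0

-- ===== PRECONDITION & SPEC =====
def Spec_parking_monitor (entries : List (String × Int)) (out : Int) : Prop := out = parking_monitor_alt entries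
instance (entries : List (String × Int)) (out : Int) : Decidable (Spec_parking_monitor entries out) := by unfold Spec_parking_monitor; infer_instance

-- ===== CLAIM (what is proved, stated in full; the proofs are below) =====
def Claim_equal_parking_monitor : Prop := ∀ (entries : List (String × Int)), Dom_parking_monitor entries → Spec_parking_monitor entries (parking_monitor entries)

-- ===== LEMMAS AND PROOFS =====

-- per-entry delta, the (spot, delta) pair list, and per-spot delta timelines
def pmDelta (e : String × Int) : Int := if e.1 == "enter" then 1 else -1

def pmPairs (entries : List (String × Int)) : List (Int × Int) :=
  entries.map (fun e => (e.2, pmDelta e))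

def pmDeltas (entries : List (String × Int)) (k : Int) : List Int :=
  ((pmPairs entries).filter (fun p => p.1 == k)).map (fun p => p.2)

def pmSum (l : List Int) : Int := l.foldl (· + ·) 0

def pmStep (s : Int × Int) (d : Int) : Int × Int :=
  (s.1 + d, if s.1 + d > s.2 then s.1 + d else s.2)

def pmPeak (l : List Int) : Int := (l.foldl pmStep (0, 0)).2

def pmSpots (entries : List (String × Int)) : List Int :=
  PySem.Set.ofList (entries.map (fun e => e.2))

-- the common characterisation: max over spots of that spot's running-sum peak, from 0
def pmSpec (entries : List (String × Int)) : Int :=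
  (pmSpots entries).foldl (fun b k => max b (pmPeak (pmDeltas entries k))) 0

lemma pm_if_max (a b : Int) : (if a > b then a else b) = max b a := by
  simp only [gt_iff_lt, max_def]
  split_ifs <;> omega

lemma pm_sum_shift : ∀ (l : List Int) (r : Int), l.foldl (· + ·) r = r + l.foldl (· + ·) 0 := by
  intro l
  induction l with
  | nil => intro r; simp
  | cons x l ih => intro r; simp only [List.foldl_cons]; rw [ih (r + x), ih (0 + x)]; ring

lemma pmSum_snoc (l : List Int) (d : Int) : pmSum (l ++ [d]) = pmSum l + d := by
  simp [pmSum, List.foldl_append]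

lemma pmStep_fst : ∀ (l : List Int) (r p : Int), (l.foldl pmStep (r, p)).1 = r + pmSum l := by
  intro l
  induction l with
  | nil => intro r p; simp [pmSum]
  | cons d l ih =>
    intro r p
    simp only [List.foldl_cons, pmStep]
    rw [ih]
    have : pmSum (d :: l) = d + pmSum l := by
      simp only [pmSum, List.foldl_cons]
      rw [pm_sum_shift l (0 + d)]; ring
    rw [this]; ring

lemma pmPeak_snoc (l : List Int) (d : Int) :
    pmPeak (l ++ [d]) = max (pmPeak l) (pmSum l + d) := by
  simp only [pmPeak, List.foldl_append, List.foldl_cons, List.foldl_nil]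
  have h1 := pmStep_fst l 0 0
  rcases hS : l.foldl pmStep (0, 0) with ⟨r, p⟩
  rw [hS] at h1
  simp only at h1
  simp only [pmStep, pm_if_max, h1]
  ring_nf

lemma pm_le_foldl (f : Int → Int) :
    ∀ (l : List Int) (b : Int), b ≤ l.foldl (fun b k => max b (f k)) b := by
  intro l
  induction l with
  | nil => intro b; simp
  | cons x l ih =>
    intro b
    simp only [List.foldl_cons]
    exact le_trans (le_max_left b (f x)) (by
      have := ih (max b (f x))
      calc max b (f x) ≤ _ := this)

lemma pm_foldl_from_init (f : Int → Int) :
    ∀ (l : List Int) (b s : Int),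
      l.foldl (fun b k => max b (f k)) (max b s) = max (l.foldl (fun b k => max b (f k)) b) s := by
  intro l
  induction l with
  | nil => intro b s; simp
  | cons x l ih =>
    intro b s
    simp only [List.foldl_cons]
    rw [max_right_comm b s (f x), ih]

lemma pmDeltas_snoc (entries : List (String × Int)) (e : String × Int) (k : Int) :
    pmDeltas (entries ++ [e]) k =
      pmDeltas entries k ++ (if e.2 = k then [pmDelta e] else []) := by
  simp only [pmDeltas, pmPairs, List.map_append, List.map_cons, List.map_nil,
    List.filter_append]
  by_cases h : e.2 = k
  · simp [List.filter, h]
  · have hb : (e.2 == k) = false := by simpa using h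
    simp [List.filter, hb, h]

lemma pmDeltas_snoc_ne (entries : List (String × Int)) (e : String × Int) (k : Int)
    (h : k ≠ e.2) : pmDeltas (entries ++ [e]) k = pmDeltas entries k := by
  rw [pmDeltas_snoc]
  simp [Ne.symm h]

lemma pmSpots_nodup (entries : List (String × Int)) : (pmSpots entries).Nodup :=
  PySem.Set.nodup_ofList _

lemma pmSpec_snoc (entries : List (String × Int)) (e : String × Int) :
    pmSpec (entries ++ [e]) = max (pmSpec entries) (pmSum (pmDeltas (entries ++ [e]) e.2)) := by
  have hspots : pmSpots (entries ++ [e]) = PySem.Set.add (pmSpots entries) e.2 := by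
    unfold pmSpots
    rw [List.map_append]
    exact PySem.Set.ofList_append_singleton _ _
  have hd2 : pmDeltas (entries ++ [e]) e.2 = pmDeltas entries e.2 ++ [pmDelta e] := by
    rw [pmDeltas_snoc]; simp
  by_cases hmem : e.2 ∈ pmSpots entries
  · -- existing spot: its peak in the fold is updated to max (old peak) (new running sum)
    have hset : pmSpots (entries ++ [e]) = pmSpots entries := by
      rw [hspots, PySem.Set.add_of_mem hmem]
    obtain ⟨l₁, l₂, hsplit⟩ := List.append_of_mem hmem
    have hnd : (pmSpots entries).Nodup := pmSpots_nodup entries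
    rw [hsplit] at hnd
    rcases List.nodup_append.mp hnd with ⟨hnd1, hnd2, hdisj⟩
    have hne1 : e.2 ∉ l₁ := fun h => hdisj e.2 h e.2 List.mem_cons_self rfl
    have hne2 : e.2 ∉ l₂ := (List.nodup_cons.mp hnd2).1
    have hcong1 : ∀ (acc : Int), ∀ x ∈ l₁,
        (fun b k => max b (pmPeak (pmDeltas (entries ++ [e]) k))) acc x =
        (fun b k => max b (pmPeak (pmDeltas entries k))) acc x := by
      intro acc x hx
      have : x ≠ e.2 := fun hxe => hne1 (hxe ▸ hx)
      simp only [pmDeltas_snoc_ne entries e x this]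
    have hcong2 : ∀ (acc : Int), ∀ x ∈ l₂,
        (fun b k => max b (pmPeak (pmDeltas (entries ++ [e]) k))) acc x =
        (fun b k => max b (pmPeak (pmDeltas entries k))) acc x := by
      intro acc x hx
      have : x ≠ e.2 := fun hxe => hne2 (hxe ▸ hx)
      simp only [pmDeltas_snoc_ne entries e x this]
    simp only [pmSpec, hset, hsplit, List.foldl_append, List.foldl_cons]
    rw [PySem.List.foldl_congr_mem l₁ _ _ _ hcong1]
    rw [hd2, pmPeak_snoc]
    rw [PySem.List.foldl_congr_mem l₂ _ _ _ hcong2, pmSum_snoc, ← max_assoc,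
        pm_foldl_from_init]
  · -- fresh spot: appended at the end of the spot list
    have hset : pmSpots (entries ++ [e]) = pmSpots entries ++ [e.2] := by
      rw [hspots, PySem.Set.add_of_not_mem hmem]
    have hcong : ∀ (acc : Int), ∀ x ∈ pmSpots entries,
        (fun b k => max b (pmPeak (pmDeltas (entries ++ [e]) k))) acc x =
        (fun b k => max b (pmPeak (pmDeltas entries k))) acc x := by
      intro acc x hx
      have : x ≠ e.2 := fun hxe => hmem (hxe ▸ hx)
      simp only [pmDeltas_snoc_ne entries e x this]
    have hfresh : pmDeltas entries e.2 = [] := by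
      simp only [pmDeltas, pmPairs]
      rw [List.filter_eq_nil_iff.mpr, List.map_nil]
      intro p hp
      simp only [List.mem_map] at hp
      obtain ⟨a, ha, rfl⟩ := hp
      simp only [beq_iff_eq]
      intro hax
      exact hmem (by
        simp only [pmSpots, PySem.Set.mem_ofList, List.mem_map]
        exact ⟨a, ha, hax⟩)
    simp only [pmSpec, hset, List.foldl_append, List.foldl_cons, List.foldl_nil]
    rw [PySem.List.foldl_congr_mem _ _ _ _ hcong]
    rw [hd2, hfresh]
    have hpk : pmPeak ([] ++ [pmDelta e]) = max 0 (pmDelta e) := by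
      rw [pmPeak_snoc]; simp [pmPeak, pmSum]
    rw [hpk]
    have hnn : (0 : Int) ≤ (pmSpots entries).foldl (fun b k => max b (pmPeak (pmDeltas entries k))) 0 :=
      pm_le_foldl _ _ 0
    have hsum : pmSum ([] ++ [pmDelta e]) = pmDelta e := by simp [pmSum]
    rw [hsum, ← max_assoc, max_eq_left hnn]

-- A's loop invariant: the dict holds each spot's running sum, the max is pmSpec
def pmAstep (st : PySem.Dict Int Int × Int) (e : String × Int) : PySem.Dict Int Int × Int :=
  let taken := st.1
  let mx := st.2
  let currently := if e.1 == "enter" then taken.getD e.2 0 + 1 else taken.getD e.2 0 - 1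
  let taken' := taken.insert e.2 currently
  (taken', if currently > mx then taken'.getD e.2 0 else mx)

lemma pmA_invariant : ∀ (entries : List (String × Int)),
    (∀ k, ((entries.foldl pmAstep (PySem.Dict.empty, 0)).1).getD k 0 = pmSum (pmDeltas entries k)) ∧
    (entries.foldl pmAstep (PySem.Dict.empty, 0)).2 = pmSpec entries := by
  intro entries
  induction entries using List.reverseRecOn with
  | nil =>
    refine ⟨fun k => ?_, ?_⟩
    · simp [pmDeltas, pmPairs, pmSum, PySem.Dict.getD_empty]
    · simp [pmSpec, pmSpots, PySem.Set.ofList]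
  | append_singleton entries e ih =>
    obtain ⟨ihd, ihm⟩ := ih
    rcases hst : entries.foldl pmAstep (PySem.Dict.empty, 0) with ⟨d, m⟩
    rw [hst] at ihd ihm
    simp only at ihd ihm
    have hcur : (if e.1 == "enter" then d.getD e.2 0 + 1 else d.getD e.2 0 - 1) =
        pmSum (pmDeltas (entries ++ [e]) e.2) := by
      rw [pmDeltas_snoc, if_pos rfl, pmSum_snoc, ihd e.2]
      unfold pmDelta
      by_cases h : e.1 == "enter"
      · simp [h]
      · simp [h]; ring
    refine ⟨fun k => ?_, ?_⟩
    · simp only [List.foldl_append, hst, List.foldl_cons, List.foldl_nil, pmAstep,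
        PySem.Dict.getD_insert]
      by_cases hk : k = e.2
      · subst hk; rw [if_pos rfl, hcur]
      · rw [if_neg hk, ihd k, pmDeltas_snoc_ne entries e k hk]
    · simp only [List.foldl_append, hst, List.foldl_cons, List.foldl_nil, pmAstep,
        PySem.Dict.getD_insert_self]
      rw [pm_if_max, hcur, ihm, pmSpec_snoc]

-- B computes pmSpec: group per spot, then fold the per-spot peaks
lemma pmB_eq_spec (entries : List (String × Int)) : parking_monitor_alt entries = pmSpec entries := by
  show ((pmPairs entries).foldl (fun d p => d.modify p.1 [] (· ++ [p.2]))
          PySem.Dict.empty).values.foldl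
        (fun best deltas => if (deltas.foldl pmStep (0, 0)).2 > best
            then (deltas.foldl pmStep (0, 0)).2 else best) 0 = pmSpec entries
  have hnd : ((pmPairs entries).foldl (fun d p => d.modify p.1 [] (· ++ [p.2]))
      PySem.Dict.empty).keys.Nodup := by
    exact PySem.Dict.nodup_keys_foldl_modify_key (pmPairs entries) (fun p => p.1) []
      (fun _ p => (· ++ [p.2])) PySem.Dict.empty (by simp [PySem.Dict.keys_empty])
  have hkeys : ((pmPairs entries).foldl (fun d p => d.modify p.1 [] (· ++ [p.2]))
      PySem.Dict.empty).keys = pmSpots entries := by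
    rw [PySem.Dict.keys_foldl_modify_key (pmPairs entries) (fun p => p.1) []
      (fun _ p => (· ++ [p.2])) PySem.Dict.empty]
    simp [PySem.Dict.keys_empty, PySem.Set.update_nil_left, pmPairs, pmSpots,
      List.map_map, Function.comp_def]
  have hgetD : ∀ k, ((pmPairs entries).foldl (fun d p => d.modify p.1 [] (· ++ [p.2]))
      PySem.Dict.empty).getD k [] = pmDeltas entries k := by
    intro k
    rw [PySem.Dict.getD_foldl_modify_append]
    simp [PySem.Dict.getD_empty, pmDeltas]
  rw [PySem.Dict.values_eq_map_keys _ hnd [], List.foldl_map, hkeys]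
  apply PySem.List.foldl_congr_mem
  intro acc x _
  rw [hgetD x, pm_if_max]
  rfl

-- ===== VERDICT (by name: the statement is the Claim_ definition above) =====
theorem parking_monitor_spec : Claim_equal_parking_monitor := by
  intro entries _
  show parking_monitor entries = parking_monitor_alt entries
  rw [pmB_eq_spec]
  exact (pmA_invariant entries).2
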